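-- pv_equiv track=rewrite | github.com/patty-chow/cs-313e | MagicSquare.py | sum_adjacent_numbers
-- ===== SOURCE A (Python) =====
-- def in_square(square, n):
--     #this functions checks if the number stated in the text function is in the grid. if it isn't, it returns a 0.
--   count = 0
--   x = 0
--   y = 0
--   for row in range(len(square)):
--     for col in range(len(square)):
--       if square[row][col] == n:
--         count += 1
--         x = row
--         y = col
--   return count, x, y
--
-- def sum_adjacent_numbers (square, n):
--     #look up!
--     count,x,y = in_square(square, n)
--     if count == 0:
--         return 0
--     else:
--         pain = 0
--         for i in range(-1, 2):
--             for j in range(-1, 2):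
--                 if x + i >= len(square) or y + j >= len(square) or x + i < 0 or y + j < 0:
--                     k = 0
--                 elif i==0 and j==0:
--                     k = 0
--                 else:
--                     k = square[x + i][y + j]
--                 pain += k
--
--     return pain
-- ===== SOURCE B (Python) =====
-- def sum_adjacent_numbers(square, n):
--     # summed-area table (2-D prefix sums, one forward pass that also records the
--     # last occurrence of n); the window sum is then one inclusion-exclusion query.
--     L = len(square)
--     P = [[0] * (L + 1)]
--     pos = None
--     for i in range(L):
--         prev = P[i]
--         cur = [0]
--         for j in range(L):
--             cur.append(square[i][j] + prev[j + 1] + cur[j] - prev[j])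
--             if square[i][j] == n:
--                 pos = (i, j)
--         P.append(cur)
--     if pos is None:
--         return 0
--     x, y = pos
--     r0, c0 = max(0, x - 1), max(0, y - 1)
--     r1, c1 = min(L, x + 2), min(L, y + 2)
--     return P[r1][c1] - P[r0][c1] - P[r1][c0] + P[r0][c0] - square[x][y]
-- ===== Notes on version B (the rewrite author's own statement) =====
-- stated objective: alternative
-- what changed: Replaced A's exhaustive count-every-cell search plus nine guarded per-cell reads by a summed-area table (2-D prefix sums) built in one pass that also records the last occurrence; the neighbor sum becomes a single O(1) inclusion-exclusion rectangle query minus the center cell.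
import Mathlib
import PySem

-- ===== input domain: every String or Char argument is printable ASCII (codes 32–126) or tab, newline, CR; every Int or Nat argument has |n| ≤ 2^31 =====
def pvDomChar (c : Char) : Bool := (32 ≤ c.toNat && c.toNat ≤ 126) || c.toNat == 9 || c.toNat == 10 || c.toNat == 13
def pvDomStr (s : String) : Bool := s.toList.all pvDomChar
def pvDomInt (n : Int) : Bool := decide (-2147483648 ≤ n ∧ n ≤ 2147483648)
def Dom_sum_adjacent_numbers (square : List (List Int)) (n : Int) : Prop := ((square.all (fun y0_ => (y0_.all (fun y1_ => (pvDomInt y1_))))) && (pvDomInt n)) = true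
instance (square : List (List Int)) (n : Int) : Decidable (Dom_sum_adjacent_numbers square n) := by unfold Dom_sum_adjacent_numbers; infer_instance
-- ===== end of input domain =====

-- B replaces A's exhaustive count-everything scan plus nine guarded per-cell reads by a
-- summed-area table (2-D prefix sums) built in one pass that also records the last occurrence
-- of n; the neighbor sum is then a single inclusion-exclusion rectangle query minus the center
-- (objective: alternative algorithm, same asymptotic cost).

-- ===== PORT A =====
-- square[r][c]; Python raises IndexError out of range — Pre_ excludes that, default 0 is never read inside Pre_
def pvGet2 (square : List (List Int)) (r c : Int) : Int :=
  ((PySem.List.pyGet? ((PySem.List.pyGet? square r).getD []) c).getD 0)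

def in_square (square : List (List Int)) (n : Int) : Int × Int × Int :=
  (PySem.List.pyRange 0 (square.length : Int) 1).foldl (fun s row =>
    (PySem.List.pyRange 0 (square.length : Int) 1).foldl (fun s col =>
      if pvGet2 square row col = n then (s.1 + 1, row, col) else s) s)
    (0, 0, 0)

def sum_adjacent_numbers (square : List (List Int)) (n : Int) : Int :=
  -- 'count, x, y = in_square(square, n)' read back as the triple's projections
  if (in_square square n).1 = 0 then 0
  else
    (PySem.List.pyRange (-1) 2 1).foldl (fun pain i =>
      (PySem.List.pyRange (-1) 2 1).foldl (fun pain j =>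
        pain + (if (in_square square n).2.1 + i ≥ (square.length : Int) ∨ (in_square square n).2.2 + j ≥ (square.length : Int) ∨
                   (in_square square n).2.1 + i < 0 ∨ (in_square square n).2.2 + j < 0 then 0
                else if i = 0 ∧ j = 0 then 0
                else pvGet2 square ((in_square square n).2.1 + i) ((in_square square n).2.2 + j))) pain) 0

-- ===== PORT B =====
-- the body of Source B's outer loop (lambda-lifted): append the next prefix-sum row
-- (cur[j+1] = square[i][j] + prev[j+1] + cur[j] - prev[j]) and record any match of n
def pvStepB (square : List (List Int)) (n : Int) (L : Int)
    (st : List (List Int) × Option (Int × Int)) (i : Int) : List (List Int) × Option (Int × Int) :=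
  let prev := (PySem.List.pyGet? st.1 i).getD []
  let inner :=
    (PySem.List.pyRange 0 L 1).foldl
      (fun (s : List Int × Option (Int × Int)) j =>
        (s.1 ++ [pvGet2 square i j + (PySem.List.pyGet? prev (j + 1)).getD 0
                  + (PySem.List.pyGet? s.1 j).getD 0 - (PySem.List.pyGet? prev j).getD 0],
         if pvGet2 square i j = n then some (i, j) else s.2))
      ([0], st.2)
  (st.1 ++ [inner.1], inner.2)

def sum_adjacent_numbers_alt (square : List (List Int)) (n : Int) : Int :=
  let L : Int := (square.length : Int)
  let st := (PySem.List.pyRange 0 L 1).foldl (pvStepB square n L)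
    ([List.replicate (square.length + 1) (0 : Int)], none)
  match st.2 with
  | none => 0
  | some (x, y) =>
      pvGet2 st.1 (min L (x + 2)) (min L (y + 2))
        - pvGet2 st.1 (max 0 (x - 1)) (min L (y + 2))
        - pvGet2 st.1 (min L (x + 2)) (max 0 (y - 1))
        + pvGet2 st.1 (max 0 (x - 1)) (max 0 (y - 1))
        - pvGet2 square x y

-- ===== PRECONDITION & SPEC =====
-- Pre_ excludes ragged grids with a row shorter than len(square): there Python A raises IndexError.
def Pre_sum_adjacent_numbers (square : List (List Int)) (n : Int) : Prop :=
  ∀ row ∈ square, square.length ≤ row.length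
instance (square : List (List Int)) (n : Int) : Decidable (Pre_sum_adjacent_numbers square n) := by
  unfold Pre_sum_adjacent_numbers; infer_instance

def pvWitness_sum_adjacent_numbers : List (List Int) × Int := ([[1, 2], [3, 4]], 3)

def Spec_sum_adjacent_numbers (square : List (List Int)) (n : Int) (out : Int) : Prop := out = sum_adjacent_numbers_alt square n
instance (square : List (List Int)) (n : Int) (out : Int) : Decidable (Spec_sum_adjacent_numbers square n out) := by unfold Spec_sum_adjacent_numbers; infer_instance

-- ===== CLAIM (what is proved, stated in full; the proofs are below) =====
def Claim_equal_sum_adjacent_numbers : Prop := ∀ (square : List (List Int)) (n : Int), Dom_sum_adjacent_numbers square n → Pre_sum_adjacent_numbers square n → Spec_sum_adjacent_numbers square n (sum_adjacent_numbers square n)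

-- ===== LEMMAS AND PROOFS =====

-- row partial sum: sum of the first d entries of row r
def pvR (square : List (List Int)) (r d : Nat) : Int :=
  ((List.range d).map (fun c : Nat => pvGet2 square (r : Int) (c : Int))).sum

-- 2-D prefix sum: sum of the top-left i×j rectangle
def pvS (square : List (List Int)) (i j : Nat) : Int :=
  ((List.range i).map (fun r => pvR square r j)).sum

-- row i of the summed-area table
def pvRowSpec (square : List (List Int)) (i : Nat) : List Int :=
  (List.range (square.length + 1)).map (fun j => pvS square i j)

-- the row-major cell list both programs walk
def pvCells (L : Int) : List (Int × Int) :=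
  (PySem.List.pyRange 0 L 1).flatMap (fun r => (PySem.List.pyRange 0 L 1).map (fun c => (r, c)))

-- cells of the first k rows
def pvCellsUpTo (k : Nat) (L : Int) : List (Int × Int) :=
  (PySem.List.pyRange 0 (k : Int) 1).flatMap (fun r => (PySem.List.pyRange 0 L 1).map (fun c => (r, c)))

-- A's accumulating fold = count of matches + last match (= first match of the reversed list)
theorem pvFoldChar (p : Int × Int → Bool) (ps : List (Int × Int)) (s0 : Int × Int × Int) :
    ps.foldl (fun s a => if p a then (s.1 + 1, a.1, a.2) else s) s0 =
      match ps.reverse.find? p with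
      | some a => (s0.1 + (ps.countP p : Int), a.1, a.2)
      | none => s0 := by
  induction ps generalizing s0 with
  | nil => simp
  | cons a ps ih =>
    simp only [List.foldl_cons, ih, List.reverse_cons, List.find?_append, List.countP_cons]
    by_cases hp : p a = true
    · rcases hfind : ps.reverse.find? p with _ | b
      · have hc : ps.countP p = 0 := by
          rw [List.countP_eq_zero]
          intro x hx
          have := (List.find?_eq_none).1 hfind x (by simpa using hx)
          simpa using this
        simp [hc, hp]
      · simp only [Option.some_or, hp]
        simp [Prod.ext_iff]
        ring
    · rcases hfind : ps.reverse.find? p with _ | b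
      · simp [hp]
      · simp [hp]

-- bounds of a found cell
theorem pvCells_mem {L : Int} {a : Int × Int} (h : a ∈ pvCells L) :
    0 ≤ a.1 ∧ a.1 < L ∧ 0 ≤ a.2 ∧ a.2 < L := by
  rcases a with ⟨r, c⟩
  simp only [pvCells, List.mem_flatMap, List.mem_map] at h
  obtain ⟨r', hr', c', hc', heq⟩ := h
  obtain ⟨rfl, rfl⟩ := Prod.mk.injEq .. ▸ heq
  rw [PySem.List.mem_pyRange_one] at hr' hc'
  exact ⟨hr'.1, hr'.2, hc'.1, hc'.2⟩

-- in_square characterized by the reverse search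
theorem pv_in_square (square : List (List Int)) (n : Int) :
    in_square square n =
      match (pvCells (square.length : Int)).reverse.find? (fun a => pvGet2 square a.1 a.2 == n) with
      | some a => (((pvCells (square.length : Int)).countP (fun a => pvGet2 square a.1 a.2 == n) : Int), a.1, a.2)
      | none => (0, 0, 0) := by
  unfold in_square
  rw [show (fun (s : Int × Int × Int) (row : Int) =>
      (PySem.List.pyRange 0 (square.length : Int) 1).foldl (fun s col =>
        if pvGet2 square row col = n then (s.1 + 1, row, col) else s) s) =
      (fun (s : Int × Int × Int) (row : Int) =>
        ((PySem.List.pyRange 0 (square.length : Int) 1).map (fun c => (row, c))).foldl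
          (fun s a => if (fun a : Int × Int => pvGet2 square a.1 a.2 == n) a then (s.1 + 1, a.1, a.2) else s) s) from by
    funext s row
    rw [List.foldl_map]
    simp]
  rw [← List.foldl_flatMap, ← pvCells,
    pvFoldChar (fun a : Int × Int => pvGet2 square a.1 a.2 == n) (pvCells (square.length : Int)) (0, 0, 0)]
  rcases hfind : (pvCells (square.length : Int)).reverse.find? (fun a => pvGet2 square a.1 a.2 == n) with _ | a
  · simp
  · simp

-- 'pos' loop: the last match wins
theorem pvFoldLast {γ : Type} (p : γ → Bool) (l : List γ) (s0 : Option γ) :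
    l.foldl (fun s a => if p a then some a else s) s0 = (l.reverse.find? p).or s0 := by
  induction l generalizing s0 with
  | nil => simp
  | cons a l ih =>
    simp only [List.foldl_cons, ih, List.reverse_cons, List.find?_append]
    rcases hfind : l.reverse.find? p with _ | b
    · by_cases hp : p a = true <;> simp [hp]
    · simp

-- pvR / pvS recurrences and difference formulas
theorem pvR_succ (square : List (List Int)) (r d : Nat) :
    pvR square r (d + 1) = pvR square r d + pvGet2 square (r : Int) (d : Int) := by
  simp [pvR, List.range_succ]

theorem pvS_succ_right (square : List (List Int)) (i j : Nat) :
    pvS square i (j + 1) = pvS square i j + ((List.range i).map (fun r : Nat => pvGet2 square (r : Int) (j : Int))).sum := by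
  simp only [pvS, pvR_succ]
  rw [PySem.List.sum_map_add_int]

theorem pvSum_map_sub {α : Type} (l : List α) (f g : α → Int) :
    (l.map (fun x => f x - g x)).sum = (l.map f).sum - (l.map g).sum := by
  induction l with
  | nil => simp
  | cons a l ih => simp [ih]; ring

theorem pvS_sub (square : List (List Int)) (a b d : Nat) (h : a ≤ b) :
    pvS square b d - pvS square a d = ((List.range (b - a)).map (fun t => pvR square (a + t) d)).sum := by
  obtain ⟨k, rfl⟩ : ∃ k, b = a + k := ⟨b - a, by omega⟩
  simp only [pvS, List.range_add, List.map_append, List.sum_append, List.map_map]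
  simp [Function.comp_def]

theorem pvR_sub (square : List (List Int)) (r c d : Nat) (h : c ≤ d) :
    pvR square r d - pvR square r c = ((List.range (d - c)).map (fun u : Nat => pvGet2 square (r : Int) ((c : Int) + (u : Int)))).sum := by
  obtain ⟨k, rfl⟩ : ∃ k, d = c + k := ⟨d - c, by omega⟩
  simp only [pvR, List.range_add, List.map_append, List.sum_append, List.map_map]
  simp [Function.comp_def]

-- building one prefix-sum row: the inner loop of B
theorem pvCurFold (square : List (List Int)) (k m : Nat) (hm : m ≤ square.length) :
    (PySem.List.pyRange 0 (m : Int) 1).foldl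
      (fun cur j => cur ++ [pvGet2 square (k : Int) j + (PySem.List.pyGet? (pvRowSpec square k) (j + 1)).getD 0
          + (PySem.List.pyGet? cur j).getD 0 - (PySem.List.pyGet? (pvRowSpec square k) j).getD 0])
      [0] = (List.range (m + 1)).map (fun j => pvS square (k + 1) j) := by
  induction m with
  | zero =>
    simp only [Nat.cast_zero]
    rw [PySem.List.pyRange_one_eq_nil le_rfl]
    simp [pvS, pvR]
  | succ m ih =>
    have hm' : m ≤ square.length := by omega
    have hsplit : PySem.List.pyRange 0 ((m + 1 : Nat) : Int) 1 =
        PySem.List.pyRange 0 (m : Int) 1 ++ [(m : Int)] := by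
      push_cast
      exact PySem.List.pyRange_one_succ_right (by positivity)
    rw [hsplit, List.foldl_append, ih hm', List.foldl_cons, List.foldl_nil]
    have hprev1 : (PySem.List.pyGet? (pvRowSpec square k) ((m : Int) + 1)).getD 0 = pvS square k (m + 1) := by
      have : ((m : Int) + 1) = ((m + 1 : Nat) : Int) := by push_cast; ring
      rw [this, pvRowSpec, PySem.List.pyGet?_natCast]
      have hlt : m + 1 < square.length + 1 := by omega
      simp [List.getElem?_map, List.getElem?_range, hlt]
    have hprev0 : (PySem.List.pyGet? (pvRowSpec square k) (m : Int)).getD 0 = pvS square k m := by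
      rw [pvRowSpec, PySem.List.pyGet?_natCast]
      have hlt : m < square.length + 1 := by omega
      simp [List.getElem?_map, List.getElem?_range, hlt]
    have hcur : (PySem.List.pyGet? ((List.range (m + 1)).map (fun j => pvS square (k + 1) j)) (m : Int)).getD 0
        = pvS square (k + 1) m := by
      rw [PySem.List.pyGet?_natCast]
      simp [List.getElem?_map, List.getElem?_range]
    rw [hprev1, hprev0, hcur]
    have hval : pvGet2 square (k : Int) (m : Int) + pvS square k (m + 1) + pvS square (k + 1) m - pvS square k m
        = pvS square (k + 1) (m + 1) := by
      rw [pvS_succ_right, pvS_succ_right, List.range_succ, List.map_append, List.sum_append]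
      simp
      ring
    rw [hval]
    simp [List.range_succ]

-- the whole pass: after the first k rows, the table is the summed-area table of the
-- first k rows and pos is the last match among their cells
theorem pvMainInv (square : List (List Int)) (n : Int) (k : Nat) (hk : k ≤ square.length) :
    (PySem.List.pyRange 0 (k : Int) 1).foldl (pvStepB square n (square.length : Int))
        ([List.replicate (square.length + 1) (0 : Int)], none) =
      ((List.range (k + 1)).map (pvRowSpec square),
       (pvCellsUpTo k (square.length : Int)).reverse.find? (fun a => pvGet2 square a.1 a.2 == n)) := by
  induction k with
  | zero =>
    simp only [Nat.cast_zero]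
    rw [PySem.List.pyRange_one_eq_nil le_rfl]
    simp only [List.foldl_nil, Prod.mk.injEq]
    constructor
    · simp [pvRowSpec, pvS, List.eq_replicate_iff]
    · simp [pvCellsUpTo, PySem.List.pyRange_one_eq_nil]
  | succ k ih =>
    have hk' : k ≤ square.length := by omega
    have hklt : k < square.length := by omega
    have hsplit : PySem.List.pyRange 0 ((k + 1 : Nat) : Int) 1 =
        PySem.List.pyRange 0 (k : Int) 1 ++ [(k : Int)] := by
      push_cast
      exact PySem.List.pyRange_one_succ_right (by positivity)
    rw [hsplit, List.foldl_append, ih hk', List.foldl_cons, List.foldl_nil]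
    simp only [pvStepB]
    have hprev : (PySem.List.pyGet? ((List.range (k + 1)).map (pvRowSpec square)) (k : Int)).getD []
        = pvRowSpec square k := by
      rw [PySem.List.pyGet?_natCast]
      simp [List.getElem?_map, List.getElem?_range]
    rw [hprev]
    rw [PySem.List.foldl_prod_mk
      (fun cur j => cur ++ [pvGet2 square (k : Int) j + (PySem.List.pyGet? (pvRowSpec square k) (j + 1)).getD 0
          + (PySem.List.pyGet? cur j).getD 0 - (PySem.List.pyGet? (pvRowSpec square k) j).getD 0])
      (fun pos j => if pvGet2 square (k : Int) j = n then some ((k : Int), j) else pos)]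
    simp only [Prod.mk.injEq]
    constructor
    · -- table component
      rw [pvCurFold square k square.length le_rfl]
      rw [show (List.range (k + 1 + 1)) = List.range (k + 1) ++ [k + 1] from List.range_succ,
        List.map_append]
      simp [pvRowSpec]
    · -- pos component
      have hfold : (PySem.List.pyRange 0 (square.length : Int) 1).foldl
          (fun pos j => if pvGet2 square (k : Int) j = n then some ((k : Int), j) else pos)
          ((pvCellsUpTo k (square.length : Int)).reverse.find? (fun a => pvGet2 square a.1 a.2 == n))
          = ((((PySem.List.pyRange 0 (square.length : Int) 1).map (fun c => ((k : Int), c))).reverse.find?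
              (fun a => pvGet2 square a.1 a.2 == n)).or
             ((pvCellsUpTo k (square.length : Int)).reverse.find? (fun a => pvGet2 square a.1 a.2 == n))) := by
        rw [← pvFoldLast (fun a : Int × Int => pvGet2 square a.1 a.2 == n)
            (((PySem.List.pyRange 0 (square.length : Int) 1).map (fun c => ((k : Int), c))))]
        rw [List.foldl_map]
        simp
      rw [hfold]
      have hcells : pvCellsUpTo (k + 1) (square.length : Int) =
          pvCellsUpTo k (square.length : Int) ++
            ((PySem.List.pyRange 0 (square.length : Int) 1).map (fun c => ((k : Int), c))) := by
        unfold pvCellsUpTo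
        rw [show ((k + 1 : Nat) : Int) = ((k : Int) + 1) by push_cast; ring,
          PySem.List.pyRange_one_succ_right (by positivity), List.flatMap_append]
        simp
      rw [hcells, List.reverse_append, List.find?_append]

-- table lookup = pvS
theorem pvTabGet (square : List (List Int)) (r c : Int)
    (hr0 : 0 ≤ r) (hr1 : r ≤ (square.length : Int)) (hc0 : 0 ≤ c) (hc1 : c ≤ (square.length : Int)) :
    pvGet2 ((List.range (square.length + 1)).map (pvRowSpec square)) r c = pvS square r.toNat c.toNat := by
  obtain ⟨a, rfl⟩ : ∃ a : Nat, r = (a : Int) := ⟨r.toNat, ((Int.toNat_of_nonneg hr0).symm)⟩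
  obtain ⟨b, rfl⟩ : ∃ b : Nat, c = (b : Int) := ⟨c.toNat, ((Int.toNat_of_nonneg hc0).symm)⟩
  have h1 : a < square.length + 1 := by omega
  have h2 : b < square.length + 1 := by omega
  rw [pvGet2, PySem.List.pyGet?_natCast]
  simp [List.getElem?_map, List.getElem?_range, h1, h2, pvRowSpec, PySem.List.pyGet?_natCast]

-- the inclusion-exclusion query equals the clamped-window double sum
theorem pvRectEq (square : List (List Int)) (r0 r1 c0 c1 : Int)
    (h0 : 0 ≤ r0) (h1 : r0 ≤ r1) (h2 : 0 ≤ c0) (h3 : c0 ≤ c1) :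
    pvS square r1.toNat c1.toNat - pvS square r0.toNat c1.toNat
      - pvS square r1.toNat c0.toNat + pvS square r0.toNat c0.toNat =
    ((PySem.List.pyRange r0 r1 1).map (fun i =>
      ((PySem.List.pyRange c0 c1 1).map (fun j => pvGet2 square i j)).sum)).sum := by
  have hr0' : r0 = (r0.toNat : Int) := (Int.toNat_of_nonneg h0).symm
  have hc0' : c0 = (c0.toNat : Int) := (Int.toNat_of_nonneg h2).symm
  have hab : r0.toNat ≤ r1.toNat := by omega
  have hcd : c0.toNat ≤ c1.toNat := by omega
  have key : pvS square r1.toNat c1.toNat - pvS square r0.toNat c1.toNat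
      - pvS square r1.toNat c0.toNat + pvS square r0.toNat c0.toNat
      = ((List.range (r1.toNat - r0.toNat)).map (fun t => ((List.range (c1.toNat - c0.toNat)).map
          (fun u : Nat => pvGet2 square ((r0.toNat + t : Nat) : Int) ((c0.toNat : Int) + (u : Int)))).sum)).sum := by
    have e1 := pvS_sub square r0.toNat r1.toNat c1.toNat hab
    have e2 := pvS_sub square r0.toNat r1.toNat c0.toNat hab
    have e3 : pvS square r1.toNat c1.toNat - pvS square r0.toNat c1.toNat
        - pvS square r1.toNat c0.toNat + pvS square r0.toNat c0.toNat
        = ((List.range (r1.toNat - r0.toNat)).map (fun t => pvR square (r0.toNat + t) c1.toNat)).sum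
          - ((List.range (r1.toNat - r0.toNat)).map (fun t => pvR square (r0.toNat + t) c0.toNat)).sum := by
      rw [← e1, ← e2]; ring
    rw [e3, ← pvSum_map_sub]
    apply congrArg List.sum
    apply List.map_congr_left
    intro t _
    exact pvR_sub square (r0.toNat + t) c0.toNat c1.toNat hcd
  rw [key, PySem.List.pyRange_one r0 r1, PySem.List.pyRange_one c0 c1, List.map_map]
  have hb : (r1 - r0).toNat = r1.toNat - r0.toNat := by omega
  have hd : (c1 - c0).toNat = c1.toNat - c0.toNat := by omega
  rw [hb, hd]
  apply congrArg List.sum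
  apply List.map_congr_left
  intro t _
  simp only [Function.comp_def, List.map_map]
  apply congrArg List.sum
  apply List.map_congr_left
  intro u _
  congr 1 <;> omega

-- the 1-D clamped range sum equals the three guarded terms
theorem pvSum1D (f : Int → Int) (y L : Int) (h0 : 0 ≤ y) (h1 : y < L) :
    ((PySem.List.pyRange (max 0 (y - 1)) (min L (y + 2)) 1).map f).sum =
      (if y - 1 < 0 then 0 else f (y - 1)) + f y + (if L ≤ y + 1 then 0 else f (y + 1)) := by
  by_cases hy0 : y - 1 < 0
  · by_cases hyL : L ≤ y + 1
    · have ha : max 0 (y - 1) = y := by omega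
      have hb : min L (y + 2) = y + 1 := by omega
      rw [ha, hb, PySem.List.pyRange_one_singleton]
      simp [hy0, hyL]
    · have ha : max 0 (y - 1) = y := by omega
      have hb : min L (y + 2) = y + 2 := by omega
      rw [ha, hb, PySem.List.pyRange_one_cons (by omega),
        show y + 2 = (y + 1) + 1 by ring, PySem.List.pyRange_one_singleton]
      simp [hy0, hyL]; try ring
  · by_cases hyL : L ≤ y + 1
    · have ha : max 0 (y - 1) = y - 1 := by omega
      have hb : min L (y + 2) = y + 1 := by omega
      rw [ha, hb, PySem.List.pyRange_one_cons (by omega), show y - 1 + 1 = y by ring,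
        PySem.List.pyRange_one_singleton]
      simp [hy0, hyL]
    · have ha : max 0 (y - 1) = y - 1 := by omega
      have hb : min L (y + 2) = y + 2 := by omega
      rw [ha, hb, PySem.List.pyRange_one_cons (by omega), show y - 1 + 1 = y by ring,
        PySem.List.pyRange_one_cons (by omega), show y + 2 = (y + 1) + 1 by ring,
        PySem.List.pyRange_one_singleton]
      simp [hy0, hyL]; try ring

-- A's nine guarded offsets equal the clamped-window double sum minus the center
theorem pvWindowEq (g : Int → Int → Int) (L x y : Int)
    (hx0 : 0 ≤ x) (hxL : x < L) (hy0 : 0 ≤ y) (hyL : y < L) :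
    (PySem.List.pyRange (-1) 2 1).foldl (fun pain i =>
      (PySem.List.pyRange (-1) 2 1).foldl (fun pain j =>
        pain + (if x + i ≥ L ∨ y + j ≥ L ∨ x + i < 0 ∨ y + j < 0 then 0
                else if i = 0 ∧ j = 0 then 0
                else g (x + i) (y + j))) pain) 0 =
    ((PySem.List.pyRange (max 0 (x - 1)) (min L (x + 2)) 1).map (fun i =>
      ((PySem.List.pyRange (max 0 (y - 1)) (min L (y + 2)) 1).map (fun j => g i j)).sum)).sum - g x y := by
  have hr3 : PySem.List.pyRange (-1) 2 1 = [-1, 0, 1] := by decide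
  rw [pvSum1D _ x L hx0 hxL]
  rw [pvSum1D (fun j => g (x - 1) j) y L hy0 hyL, pvSum1D (fun j => g x j) y L hy0 hyL,
    pvSum1D (fun j => g (x + 1) j) y L hy0 hyL]
  rw [hr3]
  simp only [List.foldl_cons, List.foldl_nil]
  have e1 : ∀ z : Int, z + -1 = z - 1 := fun z => by ring
  have e0 : ∀ z : Int, z + 0 = z := fun z => by ring
  simp only [ge_iff_le, e1, e0]
  have nx : ¬ L ≤ x - 1 := by omega
  have ny : ¬ L ≤ y - 1 := by omega
  have nx0 : ¬ x < 0 := by omega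
  have ny0 : ¬ y < 0 := by omega
  have nxL : ¬ L ≤ x := by omega
  have nyL : ¬ L ≤ y := by omega
  have nx1 : ¬ x + 1 < 0 := by omega
  have ny1 : ¬ y + 1 < 0 := by omega
  by_cases h1 : x - 1 < 0 <;> by_cases h2 : L ≤ x + 1 <;>
    by_cases h3 : y - 1 < 0 <;> by_cases h4 : L ≤ y + 1 <;>
      simp [h1, h2, h3, h4, nx, ny, nx0, ny0, nxL, nyL, nx1, ny1] <;> try ring

-- ===== VERDICT (by name: the statement is the Claim_ definition above) =====
theorem sum_adjacent_numbers_spec : Claim_equal_sum_adjacent_numbers := by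
  intro square n _ _
  unfold Spec_sum_adjacent_numbers
  unfold sum_adjacent_numbers
  simp only [sum_adjacent_numbers_alt]
  rw [pvMainInv square n square.length le_rfl]
  rw [show pvCellsUpTo square.length ((square.length : Nat) : Int) = pvCells (square.length : Int) from rfl]
  rw [pv_in_square]
  rcases hfind : (pvCells (square.length : Int)).reverse.find? (fun a => pvGet2 square a.1 a.2 == n) with _ | a
  · simp [hfind]
  · have hmem : a ∈ pvCells (square.length : Int) := by
      have := List.mem_of_find?_eq_some hfind
      simpa using this
    obtain ⟨h1, h2, h3, h4⟩ := pvCells_mem hmem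
    have hcount : (pvCells (square.length : Int)).countP (fun a => pvGet2 square a.1 a.2 == n) ≠ 0 := by
      intro hz
      have := (List.countP_eq_zero.1 hz) a hmem
      have hp := List.find?_some hfind
      exact this hp
    obtain ⟨ax, ay⟩ := a
    simp only [hfind]
    rw [if_neg (show ¬ ((((pvCells (square.length : Int)).countP
        (fun a => pvGet2 square a.1 a.2 == n) : Int), ax, ay).1 = 0) from by simpa using hcount)]
    have hL0 : (0 : Int) ≤ (square.length : Int) := by positivity
    rw [pvTabGet square (min ((square.length : Int)) (ax + 2)) (min ((square.length : Int)) (ay + 2))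
        (by omega) (by omega) (by omega) (by omega),
      pvTabGet square (max 0 (ax - 1)) (min ((square.length : Int)) (ay + 2))
        (by omega) (by omega) (by omega) (by omega),
      pvTabGet square (min ((square.length : Int)) (ax + 2)) (max 0 (ay - 1))
        (by omega) (by omega) (by omega) (by omega),
      pvTabGet square (max 0 (ax - 1)) (max 0 (ay - 1))
        (by omega) (by omega) (by omega) (by omega)]
    rw [pvRectEq square (max 0 (ax - 1)) (min ((square.length : Int)) (ax + 2))
        (max 0 (ay - 1)) (min ((square.length : Int)) (ay + 2))
        (by omega) (by omega) (by omega) (by omega)]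
    rw [pvWindowEq (pvGet2 square) ((square.length : Int)) ax ay h1 h2 h3 h4]
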